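-- pv_equiv track=rewrite | github.com/seiichikick0404/coding-problems | practice/B - Rotate.py | shift_border
-- ===== SOURCE A (Python) =====
-- def shift_border(matrix):
--     n = len(matrix)
--     ans = [[0 for _ in range(n)] for _ in range(n)]
--
--     for i in range(n):
--         for j in range(n):
--             if i == 0 and j < n - 1:
--                 ans[i][j + 1] = matrix[i][j]
--             elif i < n - 1 and j == n - 1:
--                 ans[i + 1][j] = matrix[i][j]
--             elif i == n - 1 and j > 0:
--                 ans[i][j - 1] = matrix[i][j]
--             elif i > 0 and j == 0:
--                 ans[i - 1][j] = matrix[i][j]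
--             else:
--                 ans[i][j] = matrix[i][j]
--     return ans
-- ===== SOURCE B (Python) =====
-- def shift_border(matrix):
--     n = len(matrix)
--
--     def src(i, j):
--         # coordinate whose original value lands at (i, j) after one clockwise step
--         if n >= 2:
--             if i == 0 and j == 0:
--                 return (1, 0)
--             if i == 0:
--                 return (0, j - 1)
--             if j == n - 1:
--                 return (i - 1, j)
--             if i == n - 1:
--                 return (n - 1, j + 1)
--             if j == 0:
--                 return (i + 1, 0)
--         return (i, j)
--
--     return [[matrix[src(i, j)[0]][src(i, j)[1]] for j in range(n)] for i in range(n)]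
-- ===== Notes on version B (the rewrite author's own statement) =====
-- stated objective: alternative
-- what changed: B replaces A's scatter of writes into a preallocated zero matrix (each border cell pushed to its destination) with a direct gather: a closed-form source-coordinate function and one comprehension that builds each output cell from the original matrix.
import Mathlib
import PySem

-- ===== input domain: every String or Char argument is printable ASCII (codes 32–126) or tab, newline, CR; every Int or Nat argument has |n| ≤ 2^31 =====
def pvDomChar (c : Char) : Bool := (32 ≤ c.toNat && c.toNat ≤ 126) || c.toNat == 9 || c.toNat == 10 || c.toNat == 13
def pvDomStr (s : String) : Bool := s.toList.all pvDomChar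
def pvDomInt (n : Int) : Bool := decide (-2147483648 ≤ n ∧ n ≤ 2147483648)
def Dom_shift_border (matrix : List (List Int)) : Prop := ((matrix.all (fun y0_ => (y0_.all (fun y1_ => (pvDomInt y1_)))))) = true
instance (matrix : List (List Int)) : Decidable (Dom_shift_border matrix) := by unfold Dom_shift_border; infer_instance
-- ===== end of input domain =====

-- B replaces A's scatter (writing each border cell to its destination in a preallocated zero
-- matrix) with a direct gather via a closed-form source-coordinate function; same cost, cleaner.

-- ===== PORT A =====
-- matrix[i][j] (indices always in range under Pre_; default never observed there)
def pvCell (matrix : List (List Int)) (i j : Int) : Int :=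
  PySem.List.pyGetD (PySem.List.pyGetD matrix i []) j 0

-- ans[r][c] = v
def pvSetCell (ans : List (List Int)) (r c : Int) (v : Int) : List (List Int) :=
  PySem.List.pySetD ans r (PySem.List.pySetD (PySem.List.pyGetD ans r []) c v)

def shift_border (matrix : List (List Int)) : List (List Int) :=
  let n : Int := matrix.length
  let ans : List (List Int) :=
    (PySem.List.pyRange 0 n 1).map (fun _ => (PySem.List.pyRange 0 n 1).map (fun _ => (0 : Int)))
  (PySem.List.pyRange 0 n 1).foldl (fun ans i =>
    (PySem.List.pyRange 0 n 1).foldl (fun ans j =>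
      if i = 0 ∧ j < n - 1 then pvSetCell ans i (j + 1) (pvCell matrix i j)
      else if i < n - 1 ∧ j = n - 1 then pvSetCell ans (i + 1) j (pvCell matrix i j)
      else if i = n - 1 ∧ j > 0 then pvSetCell ans i (j - 1) (pvCell matrix i j)
      else if i > 0 ∧ j = 0 then pvSetCell ans (i - 1) j (pvCell matrix i j)
      else pvSetCell ans i j (pvCell matrix i j)) ans) ans

-- ===== PORT B =====
-- closed form: the coordinate whose original value lands at (i, j)
def pvSrc (n i j : Int) : Int × Int :=
  if 2 ≤ n then
    if i = 0 ∧ j = 0 then (1, 0)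
    else if i = 0 then (0, j - 1)
    else if j = n - 1 then (i - 1, j)
    else if i = n - 1 then (n - 1, j + 1)
    else if j = 0 then (i + 1, 0)
    else (i, j)
  else (i, j)

def shift_border_alt (matrix : List (List Int)) : List (List Int) :=
  let n : Int := matrix.length
  (PySem.List.pyRange 0 n 1).map (fun i =>
    (PySem.List.pyRange 0 n 1).map (fun j =>
      pvCell matrix (pvSrc n i j).1 (pvSrc n i j).2))

-- ===== PRECONDITION & SPEC =====
-- Pre_ excludes exactly the inputs where Python raises IndexError: some row shorter than len(matrix).
def Pre_shift_border (matrix : List (List Int)) : Prop :=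
  ∀ row ∈ matrix, matrix.length ≤ row.length
instance (matrix : List (List Int)) : Decidable (Pre_shift_border matrix) := by
  unfold Pre_shift_border; infer_instance
def pvWitness_shift_border : List (List Int) := [[1, 2, 3], [4, 5, 6], [7, 8, 9]]

def Spec_shift_border (matrix : List (List Int)) (out : List (List Int)) : Prop := out = shift_border_alt matrix
instance (matrix : List (List Int)) (out : List (List Int)) : Decidable (Spec_shift_border matrix out) := by unfold Spec_shift_border; infer_instance

-- ===== CLAIM (what is proved, stated in full; the proofs are below) =====
def Claim_equal_shift_border : Prop := ∀ (matrix : List (List Int)), Dom_shift_border matrix → Pre_shift_border matrix → Spec_shift_border matrix (shift_border matrix)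

-- ===== LEMMAS AND PROOFS =====

-- Nat-world proof helpers
def cellN (m : List (List Int)) (r c : Nat) : Int := (m.getD r []).getD c 0

def setCellN (a : List (List Int)) (r c : Nat) (v : Int) : List (List Int) :=
  a.set r ((a.getD r []).set c v)

def dstN (n r c : Nat) : Nat × Nat :=
  if r = 0 ∧ c + 1 < n then (0, c + 1)
  else if r + 1 < n ∧ c + 1 = n then (r + 1, c)
  else if r + 1 = n ∧ 0 < c then (r, c - 1)
  else if 0 < r ∧ c = 0 then (r - 1, c)
  else (r, c)

def srcN (n r c : Nat) : Nat × Nat :=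
  if 2 ≤ n then
    if r = 0 ∧ c = 0 then (1, 0)
    else if r = 0 then (0, c - 1)
    else if c + 1 = n then (r - 1, c)
    else if r + 1 = n then (n - 1, c + 1)
    else if c = 0 then (r + 1, 0)
    else (r, c)
  else (r, c)

def stepN (m : List (List Int)) (n : Nat) (a : List (List Int)) (r c : Nat) : List (List Int) :=
  setCellN a (dstN n r c).1 (dstN n r c).2 (cellN m r c)

def ShapeN (n : Nat) (a : List (List Int)) : Prop :=
  a.length = n ∧ ∀ row ∈ a, row.length = n

set_option maxHeartbeats 1600000 in
lemma dstN_lt (n r c : Nat) (hr : r < n) (hc : c < n) :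
    (dstN n r c).1 < n ∧ (dstN n r c).2 < n := by
  unfold dstN; split_ifs <;> simp <;> omega

set_option maxHeartbeats 1600000 in
lemma srcN_lt (n r c : Nat) (hr : r < n) (hc : c < n) :
    (srcN n r c).1 < n ∧ (srcN n r c).2 < n := by
  unfold srcN; split_ifs <;> simp <;> omega

set_option maxHeartbeats 1600000 in
lemma srcN_dstN (n r c : Nat) (hr : r < n) (hc : c < n) :
    srcN n (dstN n r c).1 (dstN n r c).2 = (r, c) := by
  unfold dstN
  split_ifs <;>
    · simp only [srcN]
      split_ifs <;> simp_all <;> omega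

set_option maxHeartbeats 1600000 in
lemma dstN_srcN (n r c : Nat) (hr : r < n) (hc : c < n) :
    dstN n (srcN n r c).1 (srcN n r c).2 = (r, c) := by
  unfold srcN
  split_ifs <;>
    · simp only [dstN]
      split_ifs <;> simp_all <;> omega

lemma getD_mem {A : Type} (a : List A) (r : Nat) (d : A) (h : r < a.length) :
    a.getD r d ∈ a := by
  rw [List.getD_eq_getElem a d h]
  exact List.getElem_mem h

lemma getD_set_self {A : Type} (a : List A) (r : Nat) (v d : A) (h : r < a.length) :
    (a.set r v).getD r d = v := by
  rw [List.getD_eq_getElem?_getD, List.getElem?_set_self h]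
  rfl

lemma getD_set_ne {A : Type} (a : List A) (p r : Nat) (v d : A) (h : r ≠ p) :
    (a.set p v).getD r d = a.getD r d := by
  rw [List.getD_eq_getElem?_getD, List.getElem?_set_ne (Ne.symm h),
    ← List.getD_eq_getElem?_getD]

lemma shape_setCellN (n : Nat) (a : List (List Int)) (r c : Nat) (v : Int)
    (h : ShapeN n a) (hr : r < a.length) : ShapeN n (setCellN a r c v) := by
  obtain ⟨hl, hrow⟩ := h
  refine ⟨by simpa [setCellN] using hl, ?_⟩
  intro row hmem
  rcases List.mem_or_eq_of_mem_set hmem with h1 | h1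
  · exact hrow _ h1
  · subst h1
    rw [List.length_set]
    exact hrow _ (getD_mem a r [] hr)

lemma cellN_setCellN (a : List (List Int)) (p q r c : Nat) (v : Int)
    (hp : p < a.length) (hq : q < (a.getD p []).length) :
    cellN (setCellN a p q v) r c = if r = p ∧ c = q then v else cellN a r c := by
  unfold cellN setCellN
  rcases eq_or_ne r p with h | h
  · subst h
    rw [getD_set_self a r _ [] hp]
    rcases eq_or_ne c q with h2 | h2
    · subst h2
      rw [getD_set_self _ c v 0 hq]
      simp
    · rw [getD_set_ne _ q c v 0 h2]
      simp [h2]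
  · rw [getD_set_ne a p r _ [] h]
    simp [h]

lemma shape_stepN (m : List (List Int)) (n : Nat) (a : List (List Int)) (r c : Nat)
    (h : ShapeN n a) (hr : r < n) (hc : c < n) : ShapeN n (stepN m n a r c) :=
  shape_setCellN n a _ _ _ h (by rw [h.1]; exact (dstN_lt n r c hr hc).1)

lemma cellN_stepN (m : List (List Int)) (n : Nat) (a : List (List Int)) (p q r c : Nat)
    (hsh : ShapeN n a) (hp : p < n) (hq : q < n) :
    cellN (stepN m n a p q) r c
      = if dstN n p q = (r, c) then cellN m p q else cellN a r c := by
  obtain ⟨hd1, hd2⟩ := dstN_lt n p q hp hq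
  obtain ⟨hl, hrow⟩ := hsh
  have hrowlen : (a.getD (dstN n p q).1 []).length = n :=
    hrow _ (getD_mem a _ [] (by omega))
  rw [stepN, cellN_setCellN a _ _ r c _ (by omega) (by omega)]
  rcases eq_or_ne (dstN n p q) (r, c) with h | h
  · have h1 : (dstN n p q).1 = r := by rw [h]
    have h2 : (dstN n p q).2 = c := by rw [h]
    rw [if_pos ⟨h1.symm, h2.symm⟩, if_pos h]
  · have hne : ¬ (r = (dstN n p q).1 ∧ c = (dstN n p q).2) := by
      rintro ⟨hx, hy⟩
      exact h (by rw [hx, hy])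
    rw [if_neg hne, if_neg h]

lemma fold_stepN_shape (m : List (List Int)) (n : Nat) (P : List (Nat × Nat))
    (a : List (List Int)) (hsh : ShapeN n a) (hP : ∀ p ∈ P, p.1 < n ∧ p.2 < n) :
    ShapeN n (P.foldl (fun a p => stepN m n a p.1 p.2) a) := by
  induction P generalizing a with
  | nil => simpa using hsh
  | cons p P ih =>
    have hp := hP p (by simp)
    exact ih _ (shape_stepN m n a p.1 p.2 hsh hp.1 hp.2) (fun q hq => hP q (by simp [hq]))

lemma fold_stepN_cell (m : List (List Int)) (n : Nat) (P : List (Nat × Nat))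
    (a : List (List Int)) (hsh : ShapeN n a)
    (hP : ∀ p ∈ P, p.1 < n ∧ p.2 < n) :
    ∀ r c, r < n → c < n →
      cellN (P.foldl (fun a p => stepN m n a p.1 p.2) a) r c
        = if ∃ p ∈ P, dstN n p.1 p.2 = (r, c)
          then cellN m (srcN n r c).1 (srcN n r c).2
          else cellN a r c := by
  induction P generalizing a with
  | nil => intro r c _ _; simp
  | cons p P ih =>
    intro r c hr hc
    have hp := hP p (by simp)
    have hstep := cellN_stepN m n a p.1 p.2 r c hsh hp.1 hp.2
    rw [List.foldl_cons,
      ih (stepN m n a p.1 p.2) (shape_stepN m n a p.1 p.2 hsh hp.1 hp.2)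
        (fun q hq => hP q (by simp [hq])) r c hr hc]
    by_cases hP' : ∃ q ∈ P, dstN n q.1 q.2 = (r, c)
    · have hcons : ∃ q ∈ p :: P, dstN n q.1 q.2 = (r, c) :=
        ⟨hP'.choose, List.mem_cons_of_mem _ hP'.choose_spec.1, hP'.choose_spec.2⟩
      rw [if_pos hP', if_pos hcons]
    · rw [if_neg hP', hstep]
      by_cases hd : dstN n p.1 p.2 = (r, c)
      · have hsrc : srcN n r c = p := by
          have := srcN_dstN n p.1 p.2 hp.1 hp.2
          rwa [hd] at this
        have hcons : ∃ q ∈ p :: P, dstN n q.1 q.2 = (r, c) :=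
          ⟨p, List.mem_cons_self, hd⟩
        rw [if_pos hd, if_pos hcons, hsrc]
      · have hcons : ¬ ∃ q ∈ p :: P, dstN n q.1 q.2 = (r, c) := by
          rintro ⟨q, hq, hdq⟩
          rcases List.mem_cons.mp hq with rfl | hq'
          · exact hd hdq
          · exact hP' ⟨q, hq', hdq⟩
        rw [if_neg hd, if_neg hcons]

-- bridges between the Int-indexed ports and the Nat world
lemma pyGetD_toNat {A : Type} (xs : List A) (i : Int) (d : A) (h : 0 ≤ i) :
    PySem.List.pyGetD xs i d = xs.getD i.toNat d := by
  have e : i = ((i.toNat : Nat) : Int) := by omega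
  conv_lhs => rw [e]
  rw [PySem.List.pyGetD_natCast]

lemma pySetD_toNat {A : Type} (xs : List A) (i : Int) (v : A) (h : 0 ≤ i) :
    PySem.List.pySetD xs i v = xs.set i.toNat v := by
  have e : i = ((i.toNat : Nat) : Int) := by omega
  conv_lhs => rw [e]
  rw [PySem.List.pySetD_natCast]

lemma pvCell_cast (m : List (List Int)) (i j : Int) (hi : 0 ≤ i) (hj : 0 ≤ j) :
    pvCell m i j = cellN m i.toNat j.toNat := by
  rw [pvCell, cellN, pyGetD_toNat _ _ _ hi, pyGetD_toNat _ _ _ hj]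

lemma pvSetCell_cast (a : List (List Int)) (r c : Int) (v : Int) (hr : 0 ≤ r) (hc : 0 ≤ c) :
    pvSetCell a r c v = setCellN a r.toNat c.toNat v := by
  rw [pvSetCell, setCellN, pySetD_toNat _ _ _ hr, pySetD_toNat _ _ _ hc,
    pyGetD_toNat _ _ _ hr]

-- A's inner write at (r, c), as the Nat-world step
lemma stepA_cast (m : List (List Int)) (n r c : Nat) (hr : r < n) (hc : c < n)
    (a : List (List Int)) :
    (if (r : Int) = 0 ∧ (c : Int) < (n : Int) - 1 then pvSetCell a (r : Int) ((c : Int) + 1) (pvCell m (r : Int) (c : Int))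
     else if (r : Int) < (n : Int) - 1 ∧ (c : Int) = (n : Int) - 1 then pvSetCell a ((r : Int) + 1) (c : Int) (pvCell m (r : Int) (c : Int))
     else if (r : Int) = (n : Int) - 1 ∧ (c : Int) > 0 then pvSetCell a (r : Int) ((c : Int) - 1) (pvCell m (r : Int) (c : Int))
     else if (r : Int) > 0 ∧ (c : Int) = 0 then pvSetCell a ((r : Int) - 1) (c : Int) (pvCell m (r : Int) (c : Int))
     else pvSetCell a (r : Int) (c : Int) (pvCell m (r : Int) (c : Int)))
      = stepN m n a r c := by
  have hcell := pvCell_cast m (r : Int) (c : Int) (by positivity) (by positivity)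
  simp only [Int.toNat_natCast] at hcell
  rw [stepN, dstN]
  split_ifs <;>
    · rw [pvSetCell_cast _ _ _ _ (by omega) (by omega), hcell]
      congr 1 <;> omega

lemma nested_foldl_eq_pairs {A B C : Type} (L1 : List A) (L2 : List B)
    (g : C → A → B → C) (init : C) :
    L1.foldl (fun a i => L2.foldl (fun a j => g a i j) a) init
      = (L1.flatMap (fun i => L2.map (fun j => (i, j)))).foldl
          (fun a p => g a p.1 p.2) init := by
  induction L1 generalizing init with
  | nil => rfl
  | cons x L1 ih => simp [List.foldl_append, List.foldl_map, ih]

lemma foldl_congr_mem' {A B : Type} (l : List A) (f g : B → A → B) (init : B)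
    (h : ∀ b a, a ∈ l → f b a = g b a) : l.foldl f init = l.foldl g init := by
  induction l generalizing init with
  | nil => rfl
  | cons x l ih =>
    rw [List.foldl_cons, List.foldl_cons, h _ _ (by simp)]
    exact ih _ (fun b a ha => h b a (by simp [ha]))

lemma pyRange_zero_natCast' (n : Nat) :
    PySem.List.pyRange 0 (n : Int) 1 = (List.range n).map (fun (k : Nat) => (k : Int)) := by
  rw [PySem.List.pyRange_one]
  simp only [sub_zero, Int.toNat_natCast, zero_add]

lemma getD_map_range {A : Type} (f : Nat → A) (n r : Nat) (d : A) (h : r < n) :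
    ((List.range n).map f).getD r d = f r := by
  rw [List.getD_eq_getElem _ _ (by simpa using h)]
  simp

-- cell characterisation of B's port
lemma alt_eq_map (m : List (List Int)) :
    shift_border_alt m = (List.range m.length).map (fun (i : Nat) =>
      (List.range m.length).map (fun (j : Nat) =>
        pvCell m (pvSrc (m.length : Int) (i : Int) (j : Int)).1
                 (pvSrc (m.length : Int) (i : Int) (j : Int)).2)) := by
  simp only [shift_border_alt, pyRange_zero_natCast', List.map_map, Function.comp_def]

set_option maxHeartbeats 1600000 in
lemma pvSrc_cast (n r c : Nat) :
    pvSrc (n : Int) (r : Int) (c : Int)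
      = (((srcN n r c).1 : Int), ((srcN n r c).2 : Int)) := by
  rw [pvSrc, srcN]
  split_ifs <;> simp_all [Prod.mk.injEq] <;> omega

lemma cellN_alt (m : List (List Int)) (r c : Nat)
    (hr : r < m.length) (hc : c < m.length) :
    cellN (shift_border_alt m) r c
      = cellN m (srcN m.length r c).1 (srcN m.length r c).2 := by
  rw [cellN, alt_eq_map, getD_map_range _ _ _ _ hr, getD_map_range _ _ _ _ hc,
    pvSrc_cast, pvCell_cast _ _ _ (by positivity) (by positivity)]
  simp [cellN]

lemma length_alt (m : List (List Int)) : (shift_border_alt m).length = m.length := by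
  rw [alt_eq_map]
  simp

lemma row_length_alt (m : List (List Int)) (row : List Int) (h : row ∈ shift_border_alt m) :
    row.length = m.length := by
  rw [alt_eq_map] at h
  simp only [List.mem_map] at h
  obtain ⟨i, _, rfl⟩ := h
  simp

-- A's port as the Nat-world pairs fold over the zero matrix
def pairsN (n : Nat) : List (Nat × Nat) :=
  (List.range n).flatMap (fun r => (List.range n).map (fun c => (r, c)))

def zerosN (n : Nat) : List (List Int) :=
  (List.range n).map (fun _ => (List.range n).map (fun _ => (0 : Int)))

lemma pairsN_mem (n : Nat) (p : Nat × Nat) (h : p ∈ pairsN n) : p.1 < n ∧ p.2 < n := by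
  simp only [pairsN, List.mem_flatMap, List.mem_map, List.mem_range] at h
  obtain ⟨r, hr, c, hc, rfl⟩ := h
  exact ⟨hr, hc⟩

lemma shift_border_eq_fold (m : List (List Int)) :
    shift_border m = (pairsN m.length).foldl
      (fun a p => stepN m m.length a p.1 p.2) (zerosN m.length) := by
  simp only [shift_border, pyRange_zero_natCast', List.foldl_map]
  rw [nested_foldl_eq_pairs]
  have hz : (((List.range m.length).map (fun (k : Nat) => (k : Int))).map
      (fun _ => ((List.range m.length).map (fun (k : Nat) => (k : Int))).map (fun _ => (0 : Int))))
      = zerosN m.length := by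
    simp [zerosN, Function.comp_def, List.map_const']
  rw [hz]
  apply foldl_congr_mem'
  intro a p hp
  have hp' := pairsN_mem m.length p hp
  exact stepA_cast m m.length p.1 p.2 hp'.1 hp'.2 a

lemma shape_zerosN (n : Nat) : ShapeN n (zerosN n) := by
  constructor
  · simp [zerosN]
  · intro row h
    simp only [zerosN, List.mem_map] at h
    obtain ⟨_, _, rfl⟩ := h
    simp

lemma pairsN_cover (n r c : Nat) (hr : r < n) (hc : c < n) :
    ∃ p ∈ pairsN n, dstN n p.1 p.2 = (r, c) := by
  obtain ⟨h1, h2⟩ := srcN_lt n r c hr hc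
  refine ⟨srcN n r c, ?_, dstN_srcN n r c hr hc⟩
  simp only [pairsN, List.mem_flatMap, List.mem_map, List.mem_range]
  exact ⟨(srcN n r c).1, h1, ⟨(srcN n r c).2, h2, rfl⟩⟩

-- ===== VERDICT (by name: the statement is the Claim_ definition above) =====
theorem shift_border_spec : Claim_equal_shift_border := by
  intro m _ _
  unfold Spec_shift_border
  rcases Nat.eq_zero_or_pos m.length with h0 | hpos
  · have hm : m = [] := List.length_eq_zero_iff.mp h0
    subst hm
    rfl
  · set n := m.length with hn
    rw [shift_border_eq_fold]
    have hsh := fold_stepN_shape m n (pairsN n) (zerosN n) (shape_zerosN n) (pairsN_mem n)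
    have hcell := fold_stepN_cell m n (pairsN n) (zerosN n) (shape_zerosN n) (pairsN_mem n)
    apply List.ext_getElem
    · rw [hsh.1, length_alt]
    · intro r h1 h2
      have hr : r < n := by rw [hsh.1] at h1; exact h1
      have hrowA : ((pairsN n).foldl (fun a p => stepN m n a p.1 p.2) (zerosN n))[r].length = n :=
        hsh.2 _ (List.getElem_mem h1)
      have hrowB : (shift_border_alt m)[r].length = n :=
        row_length_alt m _ (List.getElem_mem h2)
      apply List.ext_getElem (by rw [hrowA, hrowB])
      intro c hc1 hc2
      have hcn : c < n := by rw [hrowA] at hc1; exact hc1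
      have e1 : ((pairsN n).foldl (fun a p => stepN m n a p.1 p.2) (zerosN n))[r][c]
          = cellN ((pairsN n).foldl (fun a p => stepN m n a p.1 p.2) (zerosN n)) r c := by
        rw [cellN, List.getD_eq_getElem _ _ h1, List.getD_eq_getElem _ _ hc1]
      have e2 : (shift_border_alt m)[r][c] = cellN (shift_border_alt m) r c := by
        rw [cellN, List.getD_eq_getElem _ _ h2, List.getD_eq_getElem _ _ hc2]
      rw [e1, e2, hcell r c hr hcn, cellN_alt m r c hr hcn]
      simp only [pairsN_cover n r c hr hcn, if_true]
      rfl
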